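-- pv_equiv track=rewrite | github.com/yellowblue4233/leetcode | QuickSort.py | sort_idx
-- ===== SOURCE A (Python) =====
-- def sort_idx(sort, list):
--     "返回排列前的列表索引"
--     assert len(sort) == len(list), "sort_idex:len(sort) != len(list)"
--     idx = [-1 for _ in range(len(sort))]
--     for i_idx, i_val in enumerate(sort):
--         for j_idx, j_val in enumerate(list):
--             if i_val == j_val and (j_idx not in idx):    # 需考虑值相同的情况
--                 idx[i_idx] = j_idx
--     return idx
-- ===== SOURCE B (Python) =====
-- def sort_idx(sort, list):
--     "返回排列前的列表索引"
--     pos = {}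
--     for j, v in enumerate(list):
--         pos.setdefault(v, []).append(j)
--     out = []
--     for v in sort:
--         stack = pos.get(v, [])
--         if stack:
--             out.append(stack.pop())
--         else:
--             out.append(-1)
--     return out
-- ===== Notes on version B (the rewrite author's own statement) =====
-- stated objective: faster
-- what changed: Replaces A's nested scan (for each sort element, rescan the whole list and re-test membership in the index array) by one pass that groups the indices of each value into per-value ascending stacks in a dict, then pops the top (= largest unused) index for each sort element.
import Mathlib
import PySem

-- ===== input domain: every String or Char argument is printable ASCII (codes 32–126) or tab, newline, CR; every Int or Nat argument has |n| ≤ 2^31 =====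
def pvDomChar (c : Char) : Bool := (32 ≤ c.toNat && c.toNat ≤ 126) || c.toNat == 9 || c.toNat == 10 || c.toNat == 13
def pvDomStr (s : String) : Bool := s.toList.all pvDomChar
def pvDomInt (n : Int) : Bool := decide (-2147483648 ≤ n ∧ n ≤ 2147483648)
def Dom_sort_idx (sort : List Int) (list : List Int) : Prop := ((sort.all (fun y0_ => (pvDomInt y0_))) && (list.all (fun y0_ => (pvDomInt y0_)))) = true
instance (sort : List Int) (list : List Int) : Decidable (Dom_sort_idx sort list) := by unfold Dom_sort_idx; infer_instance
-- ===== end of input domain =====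

-- B groups each value's list indices into per-value ascending stacks once, then pops the top
-- (= largest still-unused) index for each sort element, replacing A's rescans of the whole list.

-- ===== PORT A =====
def sort_idx (sort : List Int) (list : List Int) : List Int :=
  -- idx = [-1 for _ in range(len(sort))]
  let idx0 : List Int := (PySem.List.pyRange 0 (sort.length : Int) 1).map (fun _ => (-1 : Int))
  -- for i_idx, i_val in enumerate(sort): for j_idx, j_val in enumerate(list):
  --   if i_val == j_val and (j_idx not in idx): idx[i_idx] = j_idx
  (PySem.List.enumerate sort).foldl (fun idx iv =>
    (PySem.List.enumerate list).foldl (fun idx jv =>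
      if iv.2 == jv.2 && !(idx.contains jv.1) then PySem.List.pySetD idx iv.1 jv.1 else idx)
      idx) idx0

-- ===== PORT B =====
def sort_idx_alt (sort : List Int) (list : List Int) : List Int :=
  -- pos = {}; for j, v in enumerate(list): pos.setdefault(v, []).append(j)
  let pos : PySem.Dict Int (List Int) :=
    (PySem.List.enumerate list).foldl (fun d jv => d.modify jv.2 [] (· ++ [jv.1])) PySem.Dict.empty
  -- out = []; for v in sort: stack = pos.get(v, []); out.append(stack.pop()) else out.append(-1)
  -- (stack.pop() mutates the list stored in the dict: modelled by re-inserting the popped stack)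
  (sort.foldl (fun (st : PySem.Dict Int (List Int) × List Int) v =>
      let s := st.1.getD v []
      match s.getLast? with
      | some j => (st.1.insert v s.dropLast, st.2 ++ [j])
      | none => (st.1, st.2 ++ [-1])) (pos, [])).2

-- ===== PRECONDITION & SPEC =====
-- Pre_ excludes exactly the inputs on which A's assert fails (AssertionError): unequal lengths.
def Pre_sort_idx (sort : List Int) (list : List Int) : Prop := sort.length = list.length
instance (sort : List Int) (list : List Int) : Decidable (Pre_sort_idx sort list) := by unfold Pre_sort_idx; infer_instance
def pvWitness_sort_idx : List Int × List Int := ([2, 1, 2], [2, 2, 1])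
def Spec_sort_idx (sort : List Int) (list : List Int) (out : List Int) : Prop := out = sort_idx_alt sort list
instance (sort : List Int) (list : List Int) (out : List Int) : Decidable (Spec_sort_idx sort list out) := by unfold Spec_sort_idx; infer_instance

-- ===== CLAIM (what is proved, stated in full; the proofs are below) =====
def Claim_equal_sort_idx : Prop := ∀ (sort : List Int) (list : List Int), Dom_sort_idx sort list → Pre_sort_idx sort list → Spec_sort_idx sort list (sort_idx sort list)

-- ===== LEMMAS AND PROOFS =====

-- The common behaviour both loops implement: for each sort element, pick the largest list index
-- holding that value and not yet used (-1 if none), the picks so far being the "used" set.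
def pickMax (list : List Int) (used : List Int) (v : Int) : Int :=
  (PySem.List.enumerate list).foldl
    (fun acc jv => if v == jv.2 && !(used.contains jv.1) then jv.1 else acc) (-1)

def specGo (list : List Int) (acc : List Int) : List Int → List Int
  | [] => acc
  | v :: rest => specGo list (acc ++ [pickMax list acc v]) rest
theorem set_append_cons {α : Type} (out : List α) (c x : α) (tail : List α) :
    (out ++ c :: tail).set out.length x = out ++ x :: tail := by
  induction out with
  | nil => rfl
  | cons y ys ih => simp [ih]

theorem contains_shape (out tail : List Int) (c j : Int) (htail : ∀ x ∈ tail, x = -1)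
    (hj : 0 ≤ j) (hc : c = -1 ∨ c < j) :
    (out ++ c :: tail).contains j = out.contains j := by
  have h1 : j ≠ c := by rcases hc with h | h <;> omega
  have h2 : j ∉ tail := fun hm => absurd (htail j hm) (by omega)
  simp [List.contains_eq_mem, h1, h2]

theorem innerLoop (v : Int) : ∀ (pairs : List (Int × Int)) (out tail : List Int) (cur : Int),
    (∀ x ∈ tail, x = -1) →
    pairs.Pairwise (fun p q => p.1 < q.1) →
    (∀ p ∈ pairs, 0 ≤ p.1) →
    (cur = -1 ∨ ∀ p ∈ pairs, cur < p.1) →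
    pairs.foldl (fun idx jv => if v == jv.2 && !(idx.contains jv.1)
        then PySem.List.pySetD idx ((out.length : Int)) jv.1 else idx) (out ++ cur :: tail)
      = out ++ (pairs.foldl (fun acc jv => if v == jv.2 && !(out.contains jv.1) then jv.1 else acc) cur) :: tail := by
  intro pairs
  induction pairs with
  | nil => intro out tail cur _ _ _ _; rfl
  | cons jw rest ih =>
    intro out tail cur htail hpw hpos hcur
    have hj : 0 ≤ jw.1 := hpos jw (List.mem_cons_self ..)
    have hcj : cur = -1 ∨ cur < jw.1 := by
      rcases hcur with h | h
      · exact Or.inl h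
      · exact Or.inr (h jw (List.mem_cons_self ..))
    have hcont := contains_shape out tail cur jw.1 htail hj hcj
    simp only [List.foldl_cons, hcont]
    by_cases hc : (v == jw.2 && !(out.contains jw.1)) = true
    · rw [hc]
      rw [PySem.List.pySetD_of_nonneg _ _ (by positivity), Int.toNat_natCast, set_append_cons]
      exact ih out tail jw.1 htail (hpw.sublist (List.sublist_cons_self ..)) 
        (fun p hp => hpos p (List.mem_cons_of_mem _ hp))
        (Or.inr (fun p hp => List.rel_of_pairwise_cons hpw hp))
    · rw [Bool.not_eq_true] at hc
      rw [hc]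
      simp only [Bool.false_eq_true, if_false]
      refine ih out tail cur htail (hpw.sublist (List.sublist_cons_self ..))
        (fun p hp => hpos p (List.mem_cons_of_mem _ hp)) ?_
      rcases hcur with h | h
      · exact Or.inl h
      · exact Or.inr (fun p hp => h p (List.mem_cons_of_mem _ hp))

theorem enum_pos (list : List Int) : ∀ p ∈ PySem.List.enumerate list, 0 ≤ p.1 := by
  intro p hp
  rw [PySem.List.mem_enumerate_iff] at hp
  obtain ⟨k, hk, rfl⟩ := hp
  simp

theorem outerLoop (list : List Int) : ∀ (sv : List Int) (s : Int) (acc : List Int) (m : Nat),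
    s = (acc.length : Int) → m = sv.length →
    (PySem.List.enumerate sv s).foldl (fun idx iv =>
        (PySem.List.enumerate list).foldl (fun idx jv =>
          if iv.2 == jv.2 && !(idx.contains jv.1) then PySem.List.pySetD idx iv.1 jv.1 else idx) idx)
      (acc ++ List.replicate m (-1))
      = specGo list acc sv := by
  intro sv
  induction sv with
  | nil => intro s acc m hs hm; simp [hm, specGo, PySem.List.enumerate_nil]
  | cons v rest ih =>
    intro s acc m hs hm
    subst hs hm
    rw [PySem.List.enumerate_cons, List.foldl_cons]
    simp only [List.length_cons, List.replicate_succ]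
    have hin := innerLoop v (PySem.List.enumerate list) acc (List.replicate rest.length (-1)) (-1)
      (by intro x hx; exact (List.eq_of_mem_replicate hx))
      (PySem.List.pairwise_lt_enumerate ..)
      (enum_pos list) (Or.inl rfl)
    simp only [hin]
    have hp : List.foldl (fun acc_1 jv => if (v == jv.2 && !acc.contains jv.1) = true then jv.1 else acc_1) (-1)
        (PySem.List.enumerate list) = pickMax list acc v := rfl
    rw [hp]
    have : acc ++ (pickMax list acc v) :: List.replicate rest.length (-1)
        = (acc ++ [pickMax list acc v]) ++ List.replicate rest.length (-1) := by simp
    rw [this, ih ((acc.length : Int) + 1) (acc ++ [pickMax list acc v]) rest.length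
      (by simp) rfl]
    rfl


theorem sortIdx_eq_spec (sort list : List Int) : sort_idx sort list = specGo list [] sort := by
  unfold sort_idx
  have hinit : (PySem.List.pyRange 0 (sort.length : Int) 1).map (fun _ => (-1 : Int))
      = List.replicate sort.length (-1) := by
    rw [List.map_const']
    congr 1
    simp [PySem.List.length_pyRange_one]
  simp only [hinit]
  have := outerLoop list sort 0 [] sort.length (by simp) rfl
  simpa using this

def pvMatches (list : List Int) (used : List Int) (v : Int) : List Int :=
  ((PySem.List.enumerate list).filter (fun jv => v == jv.2 && !(used.contains jv.1))).map (·.1)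

theorem foldl_lastpick {α β : Type} (f : α → β) (p : α → Bool) :
    ∀ (l : List α) (a : β), l.foldl (fun acc x => if p x then f x else acc) a
      = ((l.filter p).map f).getLast?.getD a
  | [], a => rfl
  | x :: t, a => by
    by_cases h : p x
    · simp [List.foldl_cons, h, foldl_lastpick f p t (f x), List.getLast?_cons]
    · simp [List.foldl_cons, h, foldl_lastpick f p t a]

theorem pickMax_eq_getLast (list used : List Int) (v : Int) :
    pickMax list used v = (pvMatches list used v).getLast?.getD (-1) :=
  foldl_lastpick (·.1) (fun jv => v == jv.2 && !(used.contains jv.1)) (PySem.List.enumerate list) (-1)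

theorem pvMatches_sorted (list used : List Int) (v : Int) :
    (pvMatches list used v).Pairwise (· < ·) := by
  unfold pvMatches
  exact ((PySem.List.pairwise_lt_enumerate ..).filter _).map _ (fun _ _ h => h)

theorem mem_pvMatches (list used : List Int) (v x : Int) (hx : x ∈ pvMatches list used v) :
    ∃ (k : Nat) (h : k < list.length), x = (k : Int) ∧ list[k] = v := by
  unfold pvMatches at hx
  obtain ⟨jv, hjv, rfl⟩ := List.mem_map.mp hx
  have hmem := List.mem_of_mem_filter hjv
  have hcond := List.of_mem_filter hjv
  rw [PySem.List.mem_enumerate_iff] at hmem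
  obtain ⟨k, hk, rfl⟩ := hmem
  refine ⟨k, hk, by simp, ?_⟩
  have := (Bool.and_eq_true ..).mp hcond |>.1
  simp at this
  exact this.symm

theorem pvMatches_disjoint (list used : List Int) (v w x : Int) (hvw : v ≠ w)
    (hv : x ∈ pvMatches list used v) (hw : x ∈ pvMatches list used w) : False := by
  obtain ⟨k, hk, rfl, hkv⟩ := mem_pvMatches list used v x hv
  obtain ⟨k', hk', hkk, hkw⟩ := mem_pvMatches list used w _ hw
  have hke : k = k' := by omega
  subst hke
  exact hvw (by rw [← hkv, ← hkw])

theorem pvMatches_append_neg1 (list used : List Int) (v : Int) :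
    pvMatches list (used ++ [-1]) v = pvMatches list used v := by
  unfold pvMatches
  congr 1
  apply List.filter_congr
  intro jv hjv
  have h0 : (0:Int) ≤ jv.1 := enum_pos list jv hjv
  have : jv.1 ≠ (-1 : Int) := by omega
  simp [List.contains_eq_mem, this]

theorem pvMatches_append (list used : List Int) (v m : Int) :
    pvMatches list (used ++ [m]) v = (pvMatches list used v).filter (fun x => !(x == m)) := by
  unfold pvMatches
  rw [List.filter_map]
  congr 1
  rw [List.filter_filter]
  apply List.filter_congr
  intro jv _
  simp only [List.contains_eq_mem, List.mem_append, List.mem_singleton, Function.comp]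
  by_cases h1 : v = jv.2 <;> by_cases h2 : jv.1 ∈ used <;> by_cases h3 : jv.1 = m <;>
    simp [h1, h2, h3]

theorem filter_ne_getLast (l : List Int) (j : Int) (hpw : l.Pairwise (· < ·))
    (hlast : l.getLast? = some j) : l.filter (fun x => !(x == j)) = l.dropLast := by
  have hne : l ≠ [] := by intro h; rw [h] at hlast; simp at hlast
  have hgl : l.getLast hne = j := List.getLast_of_mem_getLast? hlast
  have hdec : l.dropLast ++ [j] = l := by rw [← hgl]; exact List.dropLast_concat_getLast hne
  have hnd : l.Nodup := hpw.imp (fun h => ne_of_lt h)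
  have hjn : j ∉ l.dropLast := by
    rw [← hdec] at hnd
    have := List.disjoint_of_nodup_append hnd
    intro hm
    exact this hm (List.mem_singleton_self j)
  conv_lhs => rw [← hdec]
  rw [List.filter_append]
  have h1 : l.dropLast.filter (fun x => !(x == j)) = l.dropLast :=
    List.filter_eq_self.mpr (fun x hx => by
      simp only [Bool.not_eq_eq_eq_not, Bool.not_true, beq_eq_false_iff_ne]
      intro h; exact hjn (h ▸ hx))
  rw [h1]
  simp

theorem altLoop (list : List Int) : ∀ (sv : List Int) (acc : List Int) (pos : PySem.Dict Int (List Int)),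
    (∀ w, pos.getD w [] = pvMatches list acc w) →
    (sv.foldl (fun (st : PySem.Dict Int (List Int) × List Int) v =>
      let s := st.1.getD v []
      match s.getLast? with
      | some j => (st.1.insert v s.dropLast, st.2 ++ [j])
      | none => (st.1, st.2 ++ [-1])) (pos, acc)).2 = specGo list acc sv := by
  intro sv
  induction sv with
  | nil => intro acc pos _; rfl
  | cons v rest ih =>
    intro acc pos hpos
    rw [List.foldl_cons]
    have hs : pos.getD v [] = pvMatches list acc v := hpos v
    have hpick := pickMax_eq_getLast list acc v
    rcases hlast : (pvMatches list acc v).getLast? with _ | j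
    · rw [hlast] at hpick
      simp only [hs, hlast]
      have hgo : specGo list acc (v :: rest) = specGo list (acc ++ [(-1 : Int)]) rest := by
        rw [specGo]
        simp at hpick
        rw [hpick]
      rw [hgo]
      exact ih (acc ++ [-1]) pos (fun w => by rw [hpos w, pvMatches_append_neg1])
    · rw [hlast] at hpick
      simp only [hs, hlast]
      have hgo : specGo list acc (v :: rest) = specGo list (acc ++ [j]) rest := by
        rw [specGo]
        simp at hpick
        rw [hpick]
      rw [hgo]
      refine ih (acc ++ [j]) (pos.insert v (pvMatches list acc v).dropLast) (fun w => ?_)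
      rw [PySem.Dict.getD_insert, pvMatches_append]
      by_cases hwv : w = v
      · subst hwv
        rw [if_pos rfl]
        exact (filter_ne_getLast _ j (pvMatches_sorted list acc w) hlast).symm
      · rw [if_neg hwv, hpos w]
        symm
        apply List.filter_eq_self.mpr
        intro x hx
        simp only [Bool.not_eq_eq_eq_not, Bool.not_true, beq_eq_false_iff_ne]
        intro hxy
        subst hxy
        exact pvMatches_disjoint list acc w v x hwv hx (List.mem_of_getLast? hlast)

theorem pos0_char (list : List Int) (w : Int) :
    ((PySem.List.enumerate list).foldl (fun d jv => d.modify jv.2 [] (· ++ [jv.1])) PySem.Dict.empty).getD w []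
      = pvMatches list [] w := by
  have h : (PySem.List.enumerate list).foldl (fun d jv => d.modify jv.2 [] (· ++ [jv.1])) PySem.Dict.empty
      = ((PySem.List.enumerate list).map Prod.swap).foldl (fun d p => d.modify p.1 [] (· ++ [p.2]))
          PySem.Dict.empty := by
    rw [List.foldl_map]
    simp
  rw [h, PySem.Dict.getD_foldl_modify_append, List.filter_map, List.map_map]
  have hmap : ((fun (p : Int × Int) => p.2) ∘ Prod.swap) = (fun (p : Int × Int) => p.1) := by
    funext p; cases p; rfl
  have hfil : ∀ jv ∈ PySem.List.enumerate list,
      (((fun (p : Int × Int) => p.1 == w) ∘ Prod.swap) jv) = (w == jv.2 && !(([] : List Int).contains jv.1)) := by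
    intro jv _; cases jv; simp [eq_comm]
  rw [hmap, List.filter_congr hfil]
  simp [pvMatches]

theorem sortIdxAlt_eq_spec (sort list : List Int) : sort_idx_alt sort list = specGo list [] sort := by
  unfold sort_idx_alt
  exact altLoop list sort [] _ (fun w => pos0_char list w)

-- ===== VERDICT (by name: the statement is the Claim_ definition above) =====
theorem sort_idx_spec : Claim_equal_sort_idx := by
  intro sort list _ _
  unfold Spec_sort_idx
  rw [sortIdx_eq_spec, sortIdxAlt_eq_spec]
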